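-- pv_equiv track=rewrite | github.com/polotto/HackerRank | other-problems/flatland-space-stations/__init__.py | flatlandSpaceStations_old
-- ===== SOURCE A (Python) =====
-- def flatlandSpaceStations_old(n, c):
--     dist = 0
--     for i in range(n):
--         nearest = n
--         for j in c:
--             aux = abs(i-j)
--             if aux < nearest :
--                 nearest = aux
--         if dist < nearest:
--             dist = nearest
--     return dist
-- ===== SOURCE B (Python) =====
-- def flatlandSpaceStations_old(n, c):
--     s = sorted(c)
--     best = 0
--     k = 0
--     for i in range(n):
--         while k + 1 < len(s) and abs(s[k + 1] - i) <= abs(s[k] - i):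
--             k += 1
--         d = abs(i - s[k])
--         if best < d:
--             best = d
--     return best
-- ===== Notes on version B (the rewrite author's own statement) =====
-- stated objective: faster
-- what changed: Instead of scanning all m stations for each of the n cities, B sorts the stations once and sweeps the cities left to right with a single pointer that follows the nearest sorted station; Pre_ restricts to inputs with at least one station and a station within distance n of every city (as in the problem, where stations are cities), because with no station B raises and when a city is farther than n from every station A returns its 'nearest = n' sentinel instead of the true distance.
-- outside the precondition, e.g. on flatlandSpaceStations_old(2, []): A returns 2, B raises IndexError; on flatlandSpaceStations_old(5, [100]): A returns 5, B returns 100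
import Mathlib
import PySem

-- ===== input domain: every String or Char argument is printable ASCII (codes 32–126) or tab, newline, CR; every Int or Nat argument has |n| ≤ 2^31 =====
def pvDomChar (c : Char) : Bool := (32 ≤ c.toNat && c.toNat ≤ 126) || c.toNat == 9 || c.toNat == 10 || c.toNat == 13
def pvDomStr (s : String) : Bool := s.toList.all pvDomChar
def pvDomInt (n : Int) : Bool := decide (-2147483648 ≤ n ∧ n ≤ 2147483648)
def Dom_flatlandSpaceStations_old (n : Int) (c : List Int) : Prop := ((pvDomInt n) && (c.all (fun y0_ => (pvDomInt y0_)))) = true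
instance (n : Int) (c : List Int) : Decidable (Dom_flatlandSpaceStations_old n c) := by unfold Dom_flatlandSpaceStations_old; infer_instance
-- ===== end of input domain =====

-- B sorts the stations once and sweeps the cities with a single pointer into the sorted list,
-- instead of A's rescan of every station for every city.

-- ===== PORT A =====
-- inner loop of A: nearest = n; for j in c: aux = abs(i-j); if aux < nearest: nearest = aux
-- (the temporary 'aux' is the inlined |i - j|)
def pvNearest (n i : Int) (c : List Int) : Int :=
  c.foldl (fun nearest j => if |i - j| < nearest then |i - j| else nearest) n

def flatlandSpaceStations_old (n : Int) (c : List Int) : Int :=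
  (PySem.List.pyRange 0 n 1).foldl
    (fun dist i => if dist < pvNearest n i c then pvNearest n i c else dist) 0

-- ===== PORT B =====
-- the inner while of B: while k + 1 < len(s) and abs(s[k+1] - i) <= abs(s[k] - i): k += 1
-- (s[k] is s.getD k 0, exact here: k stays < len(s), which is nonempty on every input in Pre_)
def pvAdvance (s : List Int) (i : Int) (k : Nat) : Nat :=
  if k + 1 < s.length ∧ |s.getD (k + 1) 0 - i| ≤ |s.getD k 0 - i| then pvAdvance s i (k + 1)
  else k
termination_by s.length - k
decreasing_by omega

def flatlandSpaceStations_old_alt (n : Int) (c : List Int) : Int :=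
  let s := PySem.List.sorted c (fun x => x) false
  ((PySem.List.pyRange 0 n 1).foldl
      (fun st i =>
        let k := pvAdvance s i st.2
        let d := |i - s.getD k 0|
        (if st.1 < d then d else st.1, k)) ((0 : Int), (0 : Nat))).1

-- ===== PRECONDITION & SPEC =====
-- Pre_ asks for at least one station and, when there is a city, a station within distance n of
-- every city (some station in [-1, n]; in the problem every station is a city in [0, n-1]). It
-- excludes inputs A still returns on: with no station at all B raises IndexError where A returns
-- its 'nearest = n' sentinel, and when some city is farther than n from every station A caps that
-- city's distance at the sentinel n while B reports the true distance.
def Pre_flatlandSpaceStations_old (n : Int) (c : List Int) : Prop :=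
  c ≠ [] ∧ (n ≤ 0 ∨ ∃ j ∈ c, -1 ≤ j ∧ j ≤ n)
instance (n : Int) (c : List Int) : Decidable (Pre_flatlandSpaceStations_old n c) := by
  unfold Pre_flatlandSpaceStations_old; infer_instance

def pvWitness_flatlandSpaceStations_old : Int × List Int := (5, [0, 4])

def Spec_flatlandSpaceStations_old (n : Int) (c : List Int) (out : Int) : Prop := out = flatlandSpaceStations_old_alt n c
instance (n : Int) (c : List Int) (out : Int) : Decidable (Spec_flatlandSpaceStations_old n c out) := by unfold Spec_flatlandSpaceStations_old; infer_instance

-- ===== CLAIM (what is proved, stated in full; the proofs are below) =====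
def Claim_equal_flatlandSpaceStations_old : Prop := ∀ (n : Int) (c : List Int), Dom_flatlandSpaceStations_old n c → Pre_flatlandSpaceStations_old n c → Spec_flatlandSpaceStations_old n c (flatlandSpaceStations_old n c)

-- ===== LEMMAS AND PROOFS =====

-- the two loop bodies and the sorted list, named so the parallel induction stays readable
def pvS (c : List Int) : List Int := PySem.List.sorted c (fun x => x) false

def pvStepA (n : Int) (c : List Int) : Int → Int → Int :=
  fun dist i => if dist < pvNearest n i c then pvNearest n i c else dist

def pvStepB (s : List Int) : (Int × Nat) → Int → (Int × Nat) :=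
  fun st i =>
    let k := pvAdvance s i st.2
    let d := |i - s.getD k 0|
    (if st.1 < d then d else st.1, k)

-- inner fold of A (pvNearest with a generalized start value): bounds
theorem pvFminLeInit (i : Int) : ∀ (c : List Int) (b : Int),
    c.foldl (fun nearest j => if |i - j| < nearest then |i - j| else nearest) b ≤ b := by
  intro c
  induction c with
  | nil => intro b; simp
  | cons x t ih =>
    intro b
    simp only [List.foldl_cons]
    exact le_trans (ih _) (by split <;> omega)

theorem pvFminLeMem (i j : Int) : ∀ (c : List Int) (b : Int), j ∈ c →
    c.foldl (fun nearest j => if |i - j| < nearest then |i - j| else nearest) b ≤ |i - j| := by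
  intro c
  induction c with
  | nil => intro b h; simp at h
  | cons x t ih =>
    intro b h
    rcases List.mem_cons.mp h with h | h
    · subst h
      simp only [List.foldl_cons]
      exact le_trans (pvFminLeInit i t _) (by split <;> omega)
    · simpa using ih _ h

theorem pvLeFmin (i v : Int) : ∀ (c : List Int) (b : Int), v ≤ b → (∀ j ∈ c, v ≤ |i - j|) →
    v ≤ c.foldl (fun nearest j => if |i - j| < nearest then |i - j| else nearest) b := by
  intro c
  induction c with
  | nil => intro b hb _; simpa using hb
  | cons x t ih =>
    intro b hb hall
    simp only [List.foldl_cons]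
    refine ih _ ?_ (fun j hj => hall j (List.mem_cons_of_mem _ hj))
    have := hall x (List.mem_cons_self ..)
    split <;> omega

-- abs arithmetic on a sorted pair
theorem pvAbsLe (a b i : Int) (hab : a ≤ b) (h : |b - i| ≤ |a - i|) :
    a + b ≤ 2 * i ∨ a = b := by
  rcases abs_cases (b - i) with ⟨h1, _⟩ | ⟨h1, _⟩ <;>
    rcases abs_cases (a - i) with ⟨h2, _⟩ | ⟨h2, _⟩ <;> omega

theorem pvAbsStep (a b i : Int) (hab : a ≤ b) (h : a + b ≤ 2 * i ∨ a = b) :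
    |b - i| ≤ |a - i| := by
  rcases abs_cases (b - i) with ⟨h1, _⟩ | ⟨h1, _⟩ <;>
    rcases abs_cases (a - i) with ⟨h2, _⟩ | ⟨h2, _⟩ <;> omega

-- sorted-list facts
theorem pvSortedMono (c : List Int) :
    ∀ (i j : ℕ) (hi : i < (pvS c).length) (hj : j < (pvS c).length), i ≤ j →
      (pvS c)[i] ≤ (pvS c)[j] := by
  intro i j hi hj hij
  rcases Nat.eq_or_lt_of_le hij with h | h
  · subst h; exact le_refl _
  · have hp := PySem.List.sorted_pairwise (xs := c) (key := fun x => x)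
    exact (List.pairwise_iff_getElem.mp hp) i j hi hj h

theorem pvSortedMonoD (c : List Int) (k l : ℕ)
    (hkl : k ≤ l) (hl : l < (pvS c).length) :
    (pvS c).getD k 0 ≤ (pvS c).getD l 0 := by
  rw [List.getD_eq_getElem _ 0 (by omega), List.getD_eq_getElem _ 0 hl]
  exact pvSortedMono c k l (by omega) hl hkl

theorem pvSMem (c : List Int) (l : ℕ) (hl : l < (pvS c).length) : (pvS c).getD l 0 ∈ c := by
  rw [List.getD_eq_getElem _ 0 hl]
  have h := List.getElem_mem hl
  exact (PySem.List.mem_sorted c (fun x => x) false _).mp h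

theorem pvMemIdx (c : List Int) (j : Int) (h : j ∈ c) :
    ∃ k, k < (pvS c).length ∧ (pvS c).getD k 0 = j := by
  have hs : j ∈ pvS c := (PySem.List.mem_sorted c (fun x => x) false j).mpr h
  obtain ⟨k, hk, he⟩ := List.mem_iff_getElem.mp hs
  exact ⟨k, hk, by rw [List.getD_eq_getElem _ 0 hk]; exact he⟩

-- pvAdvance: result bounds, the conditions that let it advance, and the stop condition
theorem pvAdvanceSpec (s : List Int) (i : Int) :
    ∀ (k : ℕ), k < s.length →
      k ≤ pvAdvance s i k ∧ pvAdvance s i k < s.length ∧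
      (∀ j, k ≤ j → j + 1 ≤ pvAdvance s i k →
        |s.getD (j + 1) 0 - i| ≤ |s.getD j 0 - i|) ∧
      (pvAdvance s i k + 1 < s.length →
        |s.getD (pvAdvance s i k) 0 - i| < |s.getD (pvAdvance s i k + 1) 0 - i|) := by
  intro k
  induction k using pvAdvance.induct (s := s) (i := i) with
  | case1 k hcond ih =>
    intro hk
    rw [pvAdvance, if_pos hcond]
    obtain ⟨ih1, ih2, ih3, ih4⟩ := ih hcond.1
    refine ⟨by omega, ih2, ?_, ih4⟩
    intro j hj hj1
    rcases Nat.eq_or_lt_of_le hj with h | h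
    · subst h; exact hcond.2
    · exact ih3 j (by omega) hj1
  | case2 k hcond =>
    intro hk
    rw [pvAdvance, if_neg hcond]
    refine ⟨le_refl _, hk, fun j hj hj1 => by omega, ?_⟩
    intro h1
    rcases not_and_or.mp hcond with h | h
    · omega
    · omega

-- chaining the non-increase downwards: s[k'] is nearest among s[0..k']
theorem pvChainDown (s : List Int) (i : Int) (k' : ℕ)
    (hdec : ∀ j, j + 1 ≤ k' → |s.getD (j + 1) 0 - i| ≤ |s.getD j 0 - i|) :
    ∀ (d l : ℕ), l + d = k' → |s.getD k' 0 - i| ≤ |s.getD l 0 - i| := by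
  intro d
  induction d with
  | zero =>
    intro l hl
    have hlk : l = k' := by omega
    subst hlk
    exact le_refl _
  | succ m ih =>
    intro l hl
    have hstep := hdec l (by omega)
    have := ih (l + 1) (by omega)
    omega

-- minimality of the stopped pointer: s[k'] is a nearest station to i
theorem pvNearestAt (c : List Int) (i : Int) (k' : ℕ) (hk' : k' < (pvS c).length)
    (hdec : ∀ j, j + 1 ≤ k' → |(pvS c).getD (j + 1) 0 - i| ≤ |(pvS c).getD j 0 - i|)
    (hstop : k' + 1 < (pvS c).length →
      |(pvS c).getD k' 0 - i| < |(pvS c).getD (k' + 1) 0 - i|) :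
    ∀ l, l < (pvS c).length → |(pvS c).getD k' 0 - i| ≤ |(pvS c).getD l 0 - i| := by
  intro l hl
  rcases le_or_gt l k' with h | h
  · exact pvChainDown (pvS c) i k' hdec (k' - l) l (by omega)
  · have hk1 : k' + 1 < (pvS c).length := by omega
    have hstrict := hstop hk1
    have hab : (pvS c).getD k' 0 ≤ (pvS c).getD (k' + 1) 0 :=
      pvSortedMonoD c k' (k' + 1) (by omega) hk1
    have hbgt : i < (pvS c).getD (k' + 1) 0 := by
      rcases lt_or_ge i ((pvS c).getD (k' + 1) 0) with h | h
      · exact h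
      · exfalso
        rcases abs_cases ((pvS c).getD (k' + 1) 0 - i) with ⟨h1, _⟩ | ⟨h1, _⟩ <;>
          rcases abs_cases ((pvS c).getD k' 0 - i) with ⟨h2, _⟩ | ⟨h2, _⟩ <;> omega
    have hbl : (pvS c).getD (k' + 1) 0 ≤ (pvS c).getD l 0 :=
      pvSortedMonoD c (k' + 1) l (by omega) hl
    rcases abs_cases ((pvS c).getD l 0 - i) with ⟨h1, _⟩ | ⟨h1, _⟩ <;>
      rcases abs_cases ((pvS c).getD (k' + 1) 0 - i) with ⟨h2, _⟩ | ⟨h2, _⟩ <;> omega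

-- the parallel induction: after the first N cities, A's running max equals B's, B's pointer is in
-- range and every gap the pointer has passed lies (weakly) left of the current city
theorem pvLoop (n : Int) (c : List Int) (hc : c ≠ [])
    (j0 : Int) (hj0 : j0 ∈ c) (hj0a : -1 ≤ j0) (hj0b : j0 ≤ n) :
    ∀ N : ℕ, (N : Int) ≤ n →
      (PySem.List.pyRange 0 (N : Int) 1).foldl (pvStepA n c) 0
          = ((PySem.List.pyRange 0 (N : Int) 1).foldl (pvStepB (pvS c)) ((0 : Int), (0 : Nat))).1
        ∧ ((PySem.List.pyRange 0 (N : Int) 1).foldl (pvStepB (pvS c)) ((0 : Int), (0 : Nat))).2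
            < (pvS c).length
        ∧ ∀ j : ℕ, j + 1 ≤ ((PySem.List.pyRange 0 (N : Int) 1).foldl (pvStepB (pvS c))
              ((0 : Int), (0 : Nat))).2 →
            ((pvS c).getD j 0 + (pvS c).getD (j + 1) 0 ≤ 2 * (N : Int) ∨
              (pvS c).getD j 0 = (pvS c).getD (j + 1) 0) := by
  have hsne : pvS c ≠ [] := by
    simpa [pvS, PySem.List.sorted_eq_nil_iff] using hc
  have hlen : 0 < (pvS c).length := List.length_pos_iff.mpr hsne
  intro N
  induction N with
  | zero =>
    intro _
    have h0 : PySem.List.pyRange 0 ((0 : ℕ) : Int) 1 = [] := by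
      exact PySem.List.pyRange_one_eq_nil (by norm_num)
    refine ⟨by simp, by simpa [h0] using hlen, ?_⟩
    intro j hj
    rw [h0] at hj
    simp at hj
  | succ N ih =>
    intro hN1
    have hN : (N : Int) ≤ n := by push_cast at hN1 ⊢; omega
    have hcast : (((N + 1 : ℕ)) : Int) = (N : Int) + 1 := by push_cast; ring
    have hsplit : PySem.List.pyRange 0 ((N + 1 : ℕ) : Int) 1
        = PySem.List.pyRange 0 (N : Int) 1 ++ [(N : Int)] := by
      rw [hcast]
      exact PySem.List.pyRange_one_succ_right (by positivity)
    obtain ⟨ihA, ihK, ihI⟩ := ih hN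
    rcases hst : List.foldl (pvStepB (pvS c)) ((0 : Int), (0 : Nat))
        (PySem.List.pyRange 0 (N : Int) 1) with ⟨b, k⟩
    rw [hst] at ihA ihK ihI
    dsimp only at ihA ihK ihI
    obtain ⟨ha1, ha2, ha3, ha4⟩ := pvAdvanceSpec (pvS c) (N : Int) k ihK
    set k' := pvAdvance (pvS c) (N : Int) k with hk'def
    -- all gaps up to the new pointer are non-increasing in distance to N
    have hdec : ∀ j, j + 1 ≤ k' →
        |(pvS c).getD (j + 1) 0 - (N : Int)| ≤ |(pvS c).getD j 0 - (N : Int)| := by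
      intro j hj
      rcases le_or_gt k j with h | h
      · exact ha3 j h hj
      · exact pvAbsStep _ _ _ (pvSortedMonoD c j (j + 1) (by omega) (by omega)) (ihI j (by omega))
    have hmin := pvNearestAt c (N : Int) k' ha2 hdec ha4
    -- A's inner loop computes exactly |N - s[k']|
    have hnear : pvNearest n (N : Int) c = |(N : Int) - (pvS c).getD k' 0| := by
      have hkmem : (pvS c).getD k' 0 ∈ c := pvSMem c k' ha2
      apply le_antisymm
      · have := pvFminLeMem (N : Int) ((pvS c).getD k' 0) c n hkmem
        simpa [pvNearest] using this
      · obtain ⟨l0, hl0, hl0e⟩ := pvMemIdx c j0 hj0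
        have hvj0 : |(pvS c).getD k' 0 - (N : Int)| ≤ |j0 - (N : Int)| := by
          rw [← hl0e]; exact hmin l0 hl0
        have hvn : |(N : Int) - (pvS c).getD k' 0| ≤ n := by
          rcases abs_cases ((pvS c).getD k' 0 - (N : Int)) with ⟨h1, _⟩ | ⟨h1, _⟩ <;>
            rcases abs_cases (j0 - (N : Int)) with ⟨h2, _⟩ | ⟨h2, _⟩ <;>
            rcases abs_cases ((N : Int) - (pvS c).getD k' 0) with ⟨h3, _⟩ | ⟨h3, _⟩ <;> omega
        refine pvLeFmin (N : Int) _ c n hvn ?_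
        intro j hj
        obtain ⟨l, hl, hle⟩ := pvMemIdx c j hj
        have := hmin l hl
        rw [hle] at this
        rcases abs_cases ((pvS c).getD k' 0 - (N : Int)) with ⟨h1, _⟩ | ⟨h1, _⟩ <;>
          rcases abs_cases (j - (N : Int)) with ⟨h2, _⟩ | ⟨h2, _⟩ <;>
          rcases abs_cases ((N : Int) - (pvS c).getD k' 0) with ⟨h3, _⟩ | ⟨h3, _⟩ <;>
          rcases abs_cases ((N : Int) - j) with ⟨h4, _⟩ | ⟨h4, _⟩ <;> omega
    refine ⟨?_, ?_, ?_⟩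
    · rw [hsplit, List.foldl_append, List.foldl_append, hst]
      simp only [List.foldl_cons, List.foldl_nil]
      rw [ihA]
      simp only [pvStepA, pvStepB, ← hk'def, hnear]
    · rw [hsplit, List.foldl_append, hst]
      simp only [List.foldl_cons, List.foldl_nil]
      show (pvStepB (pvS c) (b, k) (N : Int)).2 < (pvS c).length
      simpa [pvStepB, ← hk'def] using ha2
    · rw [hsplit, List.foldl_append, hst]
      simp only [List.foldl_cons, List.foldl_nil]
      intro j hj
      have hj' : j + 1 ≤ k' := by
        simpa [pvStepB, ← hk'def] using hj
      rw [hcast]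
      rcases le_or_gt k' j with h | h
      · omega
      · rcases le_or_gt k j with h2 | h2
        · have := ha3 j h2 hj'
          rcases pvAbsLe _ _ _ (pvSortedMonoD c j (j + 1) (by omega) (by omega)) this with h3 | h3
          · left; omega
          · right; exact h3
        · rcases ihI j (by omega) with h3 | h3
          · left; omega
          · right; exact h3

-- the main equality under the precondition
theorem pvMain (n : Int) (c : List Int) (hc : c ≠ [])
    (hj : 1 ≤ n → ∃ j ∈ c, -1 ≤ j ∧ j ≤ n) :
    flatlandSpaceStations_old n c = flatlandSpaceStations_old_alt n c := by
  have hA : flatlandSpaceStations_old n c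
      = (PySem.List.pyRange 0 n 1).foldl (pvStepA n c) 0 := rfl
  have hB : flatlandSpaceStations_old_alt n c
      = ((PySem.List.pyRange 0 n 1).foldl (pvStepB (pvS c)) ((0 : Int), (0 : Nat))).1 := rfl
  rw [hA, hB]
  rcases le_or_gt n 0 with hn | hn
  · rw [PySem.List.pyRange_one_eq_nil (by omega)]
    simp
  · obtain ⟨j0, hj0, hj0a, hj0b⟩ := hj (by omega)
    have hnat : ((n.toNat : ℕ) : Int) = n := Int.toNat_of_nonneg (by omega)
    have := (pvLoop n c hc j0 hj0 hj0a hj0b n.toNat (by omega)).1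
    rwa [hnat] at this

-- ===== VERDICT (by name: the statement is the Claim_ definition above) =====
theorem flatlandSpaceStations_old_spec : Claim_equal_flatlandSpaceStations_old := by
  intro n c _ hpre
  show flatlandSpaceStations_old n c = flatlandSpaceStations_old_alt n c
  refine pvMain n c hpre.1 ?_
  intro hn
  rcases hpre.2 with h | h
  · omega
  · exact h
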